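-- pv_equiv track=rewrite | github.com/MitsuhiroTaniguchi/MahjongLM | src/tenhou_tokenizer/wall.py | _expected_wall_counter
-- ===== SOURCE A (Python) =====
-- from collections import Counter
--
-- def _expected_wall_counter(seat_count: int = 4) -> Counter[str]:
--     counts: Counter[str] = Counter()
--     if seat_count == 3:
--         counts["m1"] = 4
--         counts["m9"] = 4
--         for suit in ("p", "s"):
--             for number in range(1, 10):
--                 if number == 5:
--                     counts[f"{suit}0"] = 1
--                     counts[f"{suit}5"] = 3
--                 else:
--                     counts[f"{suit}{number}"] = 4
--         for number in range(1, 8):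
--             counts[f"z{number}"] = 4
--         return counts
--     for suit in ("m", "p", "s"):
--         for number in range(1, 10):
--             if number == 5:
--                 counts[f"{suit}0"] = 1
--                 counts[f"{suit}5"] = 3
--             else:
--                 counts[f"{suit}{number}"] = 4
--     for number in range(1, 8):
--         counts[f"z{number}"] = 4
--     return counts
-- ===== SOURCE B (Python) =====
-- from collections import Counter
--
-- def _expected_wall_counter(seat_count: int = 4) -> Counter[str]:
--     # Build the full 4-player wall once, then prune manzu for 3-player.
--     counts: Counter[str] = Counter()
--     for suit in ("m", "p", "s"):
--         for number in range(1, 10):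
--             if number == 5:
--                 counts[f"{suit}0"] = 1
--                 counts[f"{suit}5"] = 3
--             else:
--                 counts[f"{suit}{number}"] = 4
--     for number in range(1, 8):
--         counts[f"z{number}"] = 4
--     if seat_count == 3:
--         for key in ("m2", "m3", "m4", "m0", "m5", "m6", "m7", "m8"):
--             del counts[key]
--     return counts
-- ===== Notes on version B (the rewrite author's own statement) =====
-- stated objective: simpler
-- what changed: B always builds the canonical full 4-player wall with one unconditional loop and, only for seat_count == 3, deletes the manzu keys absent in three-player mahjong, replacing A's two separately hand-written construction branches.
import Mathlib
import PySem

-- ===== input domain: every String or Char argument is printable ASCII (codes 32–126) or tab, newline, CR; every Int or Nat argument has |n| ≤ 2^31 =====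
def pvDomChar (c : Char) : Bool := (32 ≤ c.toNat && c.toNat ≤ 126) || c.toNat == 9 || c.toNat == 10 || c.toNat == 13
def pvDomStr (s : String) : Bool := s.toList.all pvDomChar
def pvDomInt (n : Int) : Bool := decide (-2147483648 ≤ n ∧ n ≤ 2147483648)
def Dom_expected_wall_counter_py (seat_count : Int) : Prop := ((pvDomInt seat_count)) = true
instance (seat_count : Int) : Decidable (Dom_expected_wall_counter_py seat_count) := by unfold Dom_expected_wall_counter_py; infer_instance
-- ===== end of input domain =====

set_option maxRecDepth 4000


-- B builds the canonical full wall once and prunes manzu keys when seat_count == 3,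
-- replacing A's two separate construction branches (objective: simpler).

-- ===== PORT A =====
-- one suit loop: for number in range(1,10): …  (shared verbatim by both Python branches)
def pvFillSuit (d : PySem.Dict String Int) (suit : String) : PySem.Dict String Int :=
  (PySem.List.pyRange 1 10 1).foldl
    (fun d number =>
      if number = 5 then
        (d.insert (suit ++ "0") 1).insert (suit ++ "5") 3
      else
        d.insert (suit ++ PySem.Int.toStr number) 4)
    d

-- honors loop: for number in range(1,8): counts[f"z{number}"] = 4
def pvFillHonors (d : PySem.Dict String Int) : PySem.Dict String Int :=
  (PySem.List.pyRange 1 8 1).foldl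
    (fun d number => d.insert ("z" ++ PySem.Int.toStr number) 4) d

def expected_wall_counter_py (seat_count : Int) : List (String × Int) :=
  if seat_count = 3 then
    let counts : PySem.Dict String Int := PySem.Dict.empty
    let counts := counts.insert "m1" 4
    let counts := counts.insert "m9" 4
    let counts := ["p", "s"].foldl pvFillSuit counts
    let counts := pvFillHonors counts
    counts.items
  else
    let counts : PySem.Dict String Int := PySem.Dict.empty
    let counts := ["m", "p", "s"].foldl pvFillSuit counts
    let counts := pvFillHonors counts
    counts.items

-- ===== PORT B =====
def expected_wall_counter_py_alt (seat_count : Int) : List (String × Int) :=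
  let counts : PySem.Dict String Int := PySem.Dict.empty
  let counts := ["m", "p", "s"].foldl pvFillSuit counts
  let counts := pvFillHonors counts
  let counts :=
    if seat_count = 3 then
      ["m2", "m3", "m4", "m0", "m5", "m6", "m7", "m8"].foldl
        (fun d key => d.erase key) counts
    else counts
  counts.items

-- ===== PRECONDITION & SPEC =====
def Spec_expected_wall_counter_py (seat_count : Int) (out : List (String × Int)) : Prop := out = expected_wall_counter_py_alt seat_count
instance (seat_count : Int) (out : List (String × Int)) : Decidable (Spec_expected_wall_counter_py seat_count out) := by unfold Spec_expected_wall_counter_py; infer_instance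

-- ===== CLAIM (what is proved, stated in full; the proofs are below) =====
def Claim_equal_expected_wall_counter_py : Prop := ∀ (seat_count : Int), Dom_expected_wall_counter_py seat_count → Spec_expected_wall_counter_py seat_count (expected_wall_counter_py seat_count)

-- ===== LEMMAS AND PROOFS =====

-- ===== VERDICT (by name: the statement is the Claim_ definition above) =====
theorem expected_wall_counter_py_spec : Claim_equal_expected_wall_counter_py := by
  intro s _
  unfold Spec_expected_wall_counter_py expected_wall_counter_py expected_wall_counter_py_alt
  by_cases h : s = 3
  · subst h; decide
  · simp only [if_neg h]
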